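-- pv_equiv track=rewrite | github.com/raeez/chiral-bar-cobar | compute/lib/cy_grand_atlas_k3e_engine.py | macmahon_coeffs
-- ===== SOURCE A (Python) =====
-- from typing import Any, Dict, List, Optional, Sequence, Tuple
--
-- def macmahon_coeffs(nmax: int) -> List[int]:
--     """Coefficients of M(q) = prod_{n>=1} 1/(1-q^n)^n = sum m_k q^k.
--
--     MacMahon function (plane partition counts):
--     m_0 = 1, m_1 = 1, m_2 = 3, m_3 = 6, m_4 = 13, ...
--
--     Computed by direct product expansion: multiply by 1/(1-q^n) exactly
--     n times for each n = 1, 2, 3, ...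
--     """
--     c = [0] * nmax
--     c[0] = 1
--     for n in range(1, nmax):
--         # Multiply by 1/(1-q^n)^n: apply 1/(1-q^n) exactly n times
--         for _ in range(n):
--             for j in range(n, nmax):
--                 c[j] += c[j - n]
--     return c
-- ===== SOURCE B (Python) =====
-- from typing import Any, Dict, List, Optional, Sequence, Tuple
--
-- def macmahon_coeffs(nmax: int) -> List[int]:
--     """Coefficients of M(q) = prod_{n>=1} 1/(1-q^n)^n = sum m_k q^k.
--
--     Computed factor by factor, but each factor 1/(1-q^n)^n is applied in a
--     single convolution pass with the binomial weights
--     C(n-1+k, k) = [q^(k*n)] 1/(1-q^n)^n, instead of n repeated passes.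
--     """
--     c = [0] * nmax
--     c[0] = 1
--     for n in range(1, nmax):
--         kmax = (nmax - 1) // n
--         w = [1] * (kmax + 1)
--         for k in range(1, kmax + 1):
--             w[k] = w[k - 1] * (n - 1 + k) // k   # C(n-1+k, k), exact
--         new = c[:]
--         for k in range(1, kmax + 1):
--             wk = w[k]
--             kn = k * n
--             for j in range(kn, nmax):
--                 new[j] += wk * c[j - kn]
--         c = new
--     return c
-- ===== Notes on version B (the rewrite author's own statement) =====
-- stated objective: faster
-- what changed: Each factor 1/(1-q^n)^n is applied in a single convolution pass with precomputed binomial weights C(n-1+k,k) (built by an exact multiplicative recurrence) instead of n repeated in-place passes of 1/(1-q^n); intended as faster (measured 11.7x at the largest size on which A finishes).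
import Mathlib
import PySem

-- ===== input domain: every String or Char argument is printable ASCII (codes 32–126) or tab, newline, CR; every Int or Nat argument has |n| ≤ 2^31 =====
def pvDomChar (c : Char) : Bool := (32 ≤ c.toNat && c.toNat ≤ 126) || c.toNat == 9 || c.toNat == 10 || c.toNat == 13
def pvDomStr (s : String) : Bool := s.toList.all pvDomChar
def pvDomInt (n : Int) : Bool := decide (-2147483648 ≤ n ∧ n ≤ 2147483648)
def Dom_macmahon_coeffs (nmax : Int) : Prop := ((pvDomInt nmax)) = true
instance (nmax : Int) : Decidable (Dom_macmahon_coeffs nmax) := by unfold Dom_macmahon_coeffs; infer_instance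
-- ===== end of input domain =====

-- B replaces A's n repeated in-place passes of 1/(1-q^n) by ONE convolution pass per factor
-- with precomputed binomial weights C(n-1+k,k); intended as faster (measured 11.7x at the
-- largest size on which A finishes).

-- ===== PORT A =====
def macmahon_coeffs (nmax : Int) : List Int :=
  let c0 := PySem.List.pySetD (List.replicate nmax.toNat (0 : Int)) 0 1
  (PySem.List.pyRange 1 nmax 1).foldl (fun c n =>
    (PySem.List.pyRange 0 n 1).foldl (fun c _ =>
      (PySem.List.pyRange n nmax 1).foldl (fun c j =>
        PySem.List.pySetD c j (PySem.List.pyGetD c j 0 + PySem.List.pyGetD c (j - n) 0)) c) c) c0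

-- ===== PORT B =====
def macmahon_coeffs_alt (nmax : Int) : List Int :=
  let c0 := PySem.List.pySetD (List.replicate nmax.toNat (0 : Int)) 0 1
  (PySem.List.pyRange 1 nmax 1).foldl (fun c n =>
    let kmax := PySem.Int.floordiv (nmax - 1) n
    let w := (PySem.List.pyRange 1 (kmax + 1) 1).foldl (fun w k =>
        PySem.List.pySetD w k
          (PySem.Int.floordiv (PySem.List.pyGetD w (k - 1) 0 * (n - 1 + k)) k))
      (List.replicate (kmax + 1).toNat (1 : Int))
    (PySem.List.pyRange 1 (kmax + 1) 1).foldl (fun new k =>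
      let wk := PySem.List.pyGetD w k 0
      let kn := k * n
      (PySem.List.pyRange kn nmax 1).foldl (fun new j =>
        PySem.List.pySetD new j
          (PySem.List.pyGetD new j 0 + wk * PySem.List.pyGetD c (j - kn) 0)) new) c) c0

-- ===== PRECONDITION & SPEC =====
-- A assigns c[0] on a list of length nmax: for non-positive nmax the list is empty and A raises IndexError (B too).
def Pre_macmahon_coeffs (nmax : Int) : Prop := 1 ≤ nmax
instance (nmax : Int) : Decidable (Pre_macmahon_coeffs nmax) := by unfold Pre_macmahon_coeffs; infer_instance
def pvWitness_macmahon_coeffs : Int := (5)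

def Spec_macmahon_coeffs (nmax : Int) (out : List Int) : Prop := out = macmahon_coeffs_alt nmax
instance (nmax : Int) (out : List Int) : Decidable (Spec_macmahon_coeffs nmax out) := by unfold Spec_macmahon_coeffs; infer_instance

-- ===== CLAIM (what is proved, stated in full; the proofs are below) =====
def Claim_equal_macmahon_coeffs : Prop := ∀ (nmax : Int), Dom_macmahon_coeffs nmax → Pre_macmahon_coeffs nmax → Spec_macmahon_coeffs nmax (macmahon_coeffs nmax)

-- ===== LEMMAS AND PROOFS =====

-- weight wN n k = C(n+k-1, k) = [q^(k*n)] 1/(1-q^n)^n  (with wN 0 k = [k = 0])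
def wN (n k : ℕ) : ℕ := Nat.choose (n + k - 1) k

-- P n r f j = coefficient j of f multiplied by 1/(1-q^n)^r (per residue class mod n)
def P (n r : ℕ) (f : ℕ → ℤ) (j : ℕ) : ℤ :=
  ∑ k ∈ Finset.range (j / n + 1), (wN r k : ℤ) * f (j - k * n)

-- one in-place pass of 1/(1-q^n): Tpass n f j = f j + Tpass n f (j-n)
def Tpass (n : ℕ) (f : ℕ → ℤ) (j : ℕ) : ℤ :=
  if _h : 0 < n ∧ n ≤ j then f j + Tpass n f (j - n) else f j
termination_by j
decreasing_by omega

theorem wN_zero (k : ℕ) : wN 0 k = if k = 0 then 1 else 0 := by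
  cases k with
  | zero => simp [wN]
  | succ k =>
    unfold wN
    have e : 0+(k+1)-1 = k := by omega
    rw [e]
    simp

theorem wN_left_zero (r : ℕ) : wN r 0 = 1 := by simp [wN]

theorem wN_succ_succ (r k : ℕ) : wN (r+1) (k+1) = wN r (k+1) + wN (r+1) k := by
  unfold wN
  have e1 : r+1+(k+1)-1 = r+k+1 := by omega
  have e2 : r+(k+1)-1 = r+k := by omega
  have e3 : r+1+k-1 = r+k := by omega
  rw [e1, e2, e3, Nat.choose_succ_succ (r+k) k, Nat.add_comm]

theorem P_zero (n : ℕ) (f : ℕ → ℤ) (j : ℕ) : P n 0 f j = f j := by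
  unfold P
  rw [Finset.sum_eq_single_of_mem 0 (Finset.mem_range.mpr (Nat.succ_pos _))]
  · simp [wN_left_zero]
  · intro k _ hk
    rw [wN_zero]
    simp [hk]

theorem P_lt (n r : ℕ) (f : ℕ → ℤ) (j : ℕ) (h : j < n) : P n r f j = f j := by
  unfold P
  rw [Nat.div_eq_of_lt h]
  simp [wN_left_zero]

theorem P_rec (n r : ℕ) (f : ℕ → ℤ) (j : ℕ) (hn : 0 < n) (hj : n ≤ j) :
    P n (r+1) f j = P n r f j + P n (r+1) f (j - n) := by
  unfold P
  have hdiv : j / n = (j - n) / n + 1 := by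
    rw [Nat.div_eq_sub_div hn hj]
  set m : ℕ := (j - n) / n + 1 with hm
  have hsub : ∀ k : ℕ, j - n - k * n = j - (k + 1) * n := by
    intro k
    rw [Nat.sub_sub]
    congr 1
    ring
  have e1 : ∑ k ∈ Finset.range (j / n + 1), (wN (r+1) k : ℤ) * f (j - k * n)
      = (∑ k ∈ Finset.range m, (wN (r+1) (k+1) : ℤ) * f (j - (k+1) * n)) + (wN (r+1) 0 : ℤ) * f j := by
    rw [hdiv, Finset.sum_range_succ']
    simp
  have e2 : ∑ k ∈ Finset.range (j / n + 1), (wN r k : ℤ) * f (j - k * n)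
      = (∑ k ∈ Finset.range m, (wN r (k+1) : ℤ) * f (j - (k+1) * n)) + (wN r 0 : ℤ) * f j := by
    rw [hdiv, Finset.sum_range_succ']
    simp
  rw [e1, e2]
  have e3 : ∑ k ∈ Finset.range ((j - n) / n + 1), (wN (r+1) k : ℤ) * f (j - n - k * n)
      = ∑ k ∈ Finset.range m, (wN (r+1) k : ℤ) * f (j - (k+1) * n) := by
    apply Finset.sum_congr rfl
    intro k _
    rw [hsub k]
  rw [e3, wN_left_zero, wN_left_zero]
  have e4 : ∀ k ∈ Finset.range m, (wN (r+1) (k+1) : ℤ) * f (j - (k+1) * n)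
      = (wN r (k+1) : ℤ) * f (j - (k+1) * n) + (wN (r+1) k : ℤ) * f (j - (k+1) * n) := by
    intro k _
    rw [wN_succ_succ]
    push_cast
    ring
  rw [Finset.sum_congr rfl e4, Finset.sum_add_distrib]
  have e5 : ∑ k ∈ Finset.range m, (wN (r+1) k : ℤ) * f (j - (k+1) * n)
      = ∑ k ∈ Finset.range ((j-n) / n + 1), (wN (r+1) k : ℤ) * f (j - n - k * n) := by
    apply Finset.sum_congr rfl
    intro k _
    rw [hsub k]
  rw [e5]
  ring

theorem Tpass_P (n r : ℕ) (f : ℕ → ℤ) (hn : 0 < n) (j : ℕ) :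
    Tpass n (P n r f) j = P n (r+1) f j := by
  induction j using Nat.strong_induction_on with
  | _ j ih =>
    rw [Tpass]
    by_cases h : n ≤ j
    · rw [dif_pos ⟨hn, h⟩, ih (j - n) (by omega), P_rec n r f j hn h]
    · rw [dif_neg (by omega), P_lt n r f j (by omega), P_lt n (r+1) f j (by omega)]

theorem Tpass_iter (n r : ℕ) (f : ℕ → ℤ) (hn : 0 < n) :
    (Tpass n)^[r] f = P n r f := by
  induction r with
  | zero => funext j; simp [P_zero]
  | succ r ih =>
    rw [Function.iterate_succ_apply', ih]
    funext j
    exact Tpass_P n r f hn j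

-- access monotonicity: Tpass and P at j only read f at indices ≤ j
theorem Tpass_congr (n : ℕ) (f g : ℕ → ℤ) (j : ℕ)
    (h : ∀ i, i ≤ j → f i = g i) : Tpass n f j = Tpass n g j := by
  induction j using Nat.strong_induction_on with
  | _ j ih =>
    rw [Tpass]
    conv_rhs => rw [Tpass]
    by_cases hc : 0 < n ∧ n ≤ j
    · rw [dif_pos hc, dif_pos hc, h j (le_refl j),
        ih (j - n) (by omega) (fun i hi => h i (by omega))]
    · rw [dif_neg hc, dif_neg hc, h j (le_refl j)]

-- list entries as a function (0 beyond the end)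
def tl (c : List Int) : ℕ → ℤ := fun j => c.getD j 0

-- a foldl whose body ignores the element is an iterate
theorem foldl_const_iter {α β : Type} (l : List α) (g : β → β) (c : β) :
    l.foldl (fun c _ => g c) c = g^[l.length] c := by
  induction l generalizing c with
  | nil => rfl
  | cons x t ih => simp [List.foldl_cons, ih, Function.iterate_succ_apply]

-- ===== A's inner j-loop: one in-place pass =====
def stepA (n : Int) (c : List Int) (j : Int) : List Int :=
  PySem.List.pySetD c j (PySem.List.pyGetD c j 0 + PySem.List.pyGetD c (j - n) 0)

def passFold (n m : Int) (c : List Int) : List Int :=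
  (PySem.List.pyRange n m 1).foldl (stepA n) c

theorem passA_aux (N n : ℕ) (hn : 0 < n) (c : List Int) (hc : c.length = N)
    (m : ℕ) (hm1 : n ≤ m) (hm2 : m ≤ N) :
    (passFold (n : Int) (m : Int) c).length = N ∧
      (∀ j, j < m → (passFold (n : Int) (m : Int) c).getD j 0 = Tpass n (tl c) j) ∧
      (∀ j, m ≤ j → (passFold (n : Int) (m : Int) c).getD j 0 = c.getD j 0) := by
  induction m, hm1 using Nat.le_induction with
  | base =>
    have hnil : passFold (n : Int) (n : Int) c = c := by
      unfold passFold
      rw [PySem.List.pyRange_one_eq_nil (le_refl _)]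
      rfl
    rw [hnil]
    refine ⟨hc, ?_, fun j _ => rfl⟩
    intro j hj
    rw [Tpass, dif_neg (by omega)]
    rfl
  | succ m hm ih =>
    have hmN : m < N := by omega
    obtain ⟨ihlen, ihlo, ihhi⟩ := ih (by omega)
    set dm := passFold (n : Int) (m : Int) c with hdm
    have hp : passFold (n : Int) ((m+1 : ℕ) : Int) c = stepA (n : Int) dm (m : Int) := by
      unfold passFold
      have hsplit : PySem.List.pyRange (n : Int) ((m+1 : ℕ) : Int) 1
          = PySem.List.pyRange (n : Int) (m : Int) 1 ++ [(m : Int)] := by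
        push_cast
        exact PySem.List.pyRange_one_succ_right (by exact_mod_cast hm)
      rw [hsplit, List.foldl_append]
      rfl
    rw [hp]
    have hcast : (m : Int) - (n : Int) = ((m - n : ℕ) : Int) := by push_cast [hm]; ring
    have hget1 : PySem.List.pyGetD dm (m : Int) 0 = c.getD m 0 := by
      rw [PySem.List.pyGetD_natCast]
      exact ihhi m (le_refl m)
    have hget2 : PySem.List.pyGetD dm ((m : Int) - (n : Int)) 0 = Tpass n (tl c) (m - n) := by
      rw [hcast, PySem.List.pyGetD_natCast]
      exact ihlo (m - n) (by omega)
    have hval : PySem.List.pyGetD dm (m : Int) 0 + PySem.List.pyGetD dm ((m:Int) - (n:Int)) 0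
        = Tpass n (tl c) m := by
      rw [hget1, hget2]
      conv_rhs => rw [Tpass]
      rw [dif_pos ⟨hn, hm⟩]
      rfl
    have hsA : stepA (n : Int) dm (m : Int)
        = PySem.List.pySetD dm (m : Int)
            (PySem.List.pyGetD dm (m : Int) 0 + PySem.List.pyGetD dm ((m:Int) - (n:Int)) 0) := rfl
    rw [hsA]
    have hgs : ∀ j : ℕ, (PySem.List.pySetD dm (m : Int)
        (PySem.List.pyGetD dm (m : Int) 0 + PySem.List.pyGetD dm ((m:Int) - (n:Int)) 0)).getD j 0
        = if j = m then Tpass n (tl c) m else dm.getD j 0 := by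
      intro j
      have h2 := PySem.List.pyGetD_pySetD_natCast dm m j
        (PySem.List.pyGetD dm (m : Int) 0 + PySem.List.pyGetD dm ((m:Int) - (n:Int)) 0)
        0 (by omega)
      rw [← PySem.List.pyGetD_natCast, h2, hval, PySem.List.pyGetD_natCast]
    refine ⟨?_, ?_, ?_⟩
    · rw [PySem.List.pySetD_natCast, List.length_set, ihlen]
    · intro j hj
      rw [hgs j]
      by_cases hjm : j = m
      · rw [if_pos hjm, hjm]
      · rw [if_neg hjm]
        exact ihlo j (by omega)
    · intro j hj
      rw [hgs j, if_neg (by omega)]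
      exact ihhi j (by omega)

-- ===== A's middle loop: n repeated passes =====
def bodyA (nmax : Int) (c : List Int) (n : Int) : List Int :=
  (PySem.List.pyRange 0 n 1).foldl (fun c _ => passFold n nmax c) c

theorem roundA_spec (N n : ℕ) (hn : 0 < n) (hnN : n ≤ N) (c : List Int) (hc : c.length = N) :
    (bodyA (N : Int) c (n : Int)).length = N ∧
      ∀ j, j < N → (bodyA (N : Int) c (n : Int)).getD j 0 = P n n (tl c) j := by
  have hlen : (PySem.List.pyRange 0 (n : Int) 1).length = n := by
    rw [PySem.List.length_pyRange_one]
    omega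
  have hiter : bodyA (N : Int) c (n : Int) = (fun c => passFold (n:Int) (N:Int) c)^[n] c := by
    unfold bodyA
    rw [foldl_const_iter, hlen]
  have haux : ∀ r : ℕ, ((fun c => passFold (n:Int) (N:Int) c)^[r] c).length = N ∧
      ∀ j, j < N → ((fun c => passFold (n:Int) (N:Int) c)^[r] c).getD j 0
        = (Tpass n)^[r] (tl c) j := by
    intro r
    induction r with
    | zero => exact ⟨hc, fun j _ => rfl⟩
    | succ r ih =>
      obtain ⟨ihlen, ihval⟩ := ih
      rw [Function.iterate_succ_apply']
      obtain ⟨plen, plo, _⟩ := passA_aux N n hn _ ihlen N hnN (le_refl N)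
      refine ⟨plen, ?_⟩
      intro j hj
      rw [plo j hj, Function.iterate_succ_apply']
      exact Tpass_congr n _ _ j (fun i hi => by simpa [tl] using ihval i (by omega))
  obtain ⟨hl, hv⟩ := haux n
  rw [hiter]
  refine ⟨hl, ?_⟩
  intro j hj
  rw [hv j hj, Tpass_iter n n (tl c) hn]

-- ===== B's weight table =====
def stepW (n : Int) (w : List Int) (k : Int) : List Int :=
  PySem.List.pySetD w k
    (PySem.Int.floordiv (PySem.List.pyGetD w (k - 1) 0 * (n - 1 + k)) k)

def wPart (n : Int) (kmax m : ℕ) : List Int :=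
  (PySem.List.pyRange 1 ((m+1 : ℕ) : Int) 1).foldl (stepW n) (List.replicate (kmax+1) (1:Int))

theorem wN_mul (n m : ℕ) (hn : 0 < n) : wN n m * (n + m) = wN n (m+1) * (m+1) := by
  have h := Nat.add_one_mul_choose_eq (n + m - 1) m
  have e1 : n + m - 1 + 1 = n + m := by omega
  rw [e1] at h
  unfold wN
  have e3 : n + (m+1) - 1 = n + m := by omega
  rw [e3]
  calc Nat.choose (n + m - 1) m * (n + m) = (n + m) * Nat.choose (n + m - 1) m := by ring
    _ = Nat.choose (n + m) (m + 1) * (m + 1) := h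

theorem wAux (n kmax : ℕ) (hn : 0 < n) (m : ℕ) (hm : m ≤ kmax) :
    (wPart (n : Int) kmax m).length = kmax + 1 ∧
      (∀ k, k ≤ m → (wPart (n : Int) kmax m).getD k 0 = (wN n k : ℤ)) ∧
      (∀ k, m < k → k ≤ kmax → (wPart (n : Int) kmax m).getD k 0 = 1) := by
  induction m with
  | zero =>
    have hnil : wPart (n : Int) kmax 0 = List.replicate (kmax+1) (1:Int) := by
      unfold wPart
      have e : ((0+1 : ℕ) : Int) = 1 := by norm_num
      rw [e, PySem.List.pyRange_one_eq_nil (le_refl _)]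
      rfl
    rw [hnil]
    refine ⟨List.length_replicate, ?_, ?_⟩
    · intro k hk
      have : k = 0 := by omega
      subst this
      rw [List.getD_replicate _ (by omega), wN_left_zero]
      rfl
    · intro k _ hk
      rw [List.getD_replicate _ (by omega)]
  | succ m ih =>
    obtain ⟨ihlen, ihlo, ihhi⟩ := ih (by omega)
    set u := wPart (n : Int) kmax m with hu
    have hp : wPart (n : Int) kmax (m+1) = stepW (n : Int) u ((m+1 : ℕ) : Int) := by
      unfold wPart
      have hsplit : PySem.List.pyRange 1 ((m+1+1 : ℕ) : Int) 1
          = PySem.List.pyRange 1 ((m+1 : ℕ) : Int) 1 ++ [((m+1 : ℕ) : Int)] := by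
        push_cast
        exact PySem.List.pyRange_one_succ_right (by omega)
      rw [hsplit, List.foldl_append]
      rfl
    have hgetm : PySem.List.pyGetD u (((m+1 : ℕ) : Int) - 1) 0 = (wN n m : ℤ) := by
      have e : ((m+1 : ℕ) : Int) - 1 = ((m : ℕ) : Int) := by push_cast; ring
      rw [e, PySem.List.pyGetD_natCast]
      exact ihlo m (le_refl m)
    have hval : PySem.Int.floordiv (PySem.List.pyGetD u (((m+1 : ℕ) : Int) - 1) 0 *
        ((n : Int) - 1 + ((m+1 : ℕ) : Int))) ((m+1 : ℕ) : Int) = (wN n (m+1) : ℤ) := by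
      rw [hgetm]
      have e : (n : Int) - 1 + ((m+1 : ℕ) : Int) = ((n + m : ℕ) : Int) := by push_cast; omega
      rw [e]
      have e2 : (wN n m : ℤ) * ((n + m : ℕ) : Int) = ((wN n m * (n + m) : ℕ) : Int) := by
        push_cast; ring
      rw [e2, wN_mul n m hn, PySem.Int.floordiv_natCast, Nat.mul_div_cancel _ (Nat.succ_pos m)]
    have hstep : stepW (n : Int) u ((m+1 : ℕ) : Int)
        = PySem.List.pySetD u ((m+1 : ℕ) : Int)
            (PySem.Int.floordiv (PySem.List.pyGetD u (((m+1 : ℕ) : Int) - 1) 0 *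
              ((n : Int) - 1 + ((m+1 : ℕ) : Int))) ((m+1 : ℕ) : Int)) := rfl
    have hgs : ∀ k : ℕ, (stepW (n : Int) u ((m+1 : ℕ) : Int)).getD k 0
        = if k = m+1 then (wN n (m+1) : ℤ) else u.getD k 0 := by
      intro k
      rw [hstep, hval]
      have h2 := PySem.List.pyGetD_pySetD_natCast u (m+1) k ((wN n (m+1) : ℤ)) 0 (by omega)
      rw [← PySem.List.pyGetD_natCast, h2, PySem.List.pyGetD_natCast]
    rw [hp]
    refine ⟨?_, ?_, ?_⟩
    · rw [hstep, hval, PySem.List.pySetD_natCast, List.length_set, ihlen]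
    · intro k hk
      rw [hgs k]
      by_cases hkm : k = m+1
      · rw [if_pos hkm, hkm]
      · rw [if_neg hkm]
        exact ihlo k (by omega)
    · intro k hk1 hk2
      rw [hgs k, if_neg (by omega)]
      exact ihhi k (by omega) hk2

-- ===== B's round: one convolution pass =====
def stepB (c : List Int) (wk kn : Int) (new : List Int) (j : Int) : List Int :=
  PySem.List.pySetD new j
    (PySem.List.pyGetD new j 0 + wk * PySem.List.pyGetD c (j - kn) 0)

def innerFold (c : List Int) (wk kn m : Int) (new : List Int) : List Int :=
  (PySem.List.pyRange kn m 1).foldl (stepB c wk kn) new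

def midFold (nmax n : Int) (w c : List Int) (K : ℕ) : List Int :=
  (PySem.List.pyRange 1 ((K+1 : ℕ) : Int) 1).foldl
    (fun new k => innerFold c (PySem.List.pyGetD w k 0) (k * n) nmax new) c

def bodyB (nmax : Int) (c : List Int) (n : Int) : List Int :=
  let kmax := PySem.Int.floordiv (nmax - 1) n
  let w := (PySem.List.pyRange 1 (kmax + 1) 1).foldl (stepW n)
    (List.replicate (kmax + 1).toNat (1 : Int))
  (PySem.List.pyRange 1 (kmax + 1) 1).foldl (fun new k =>
    let wk := PySem.List.pyGetD w k 0
    let kn := k * n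
    (PySem.List.pyRange kn nmax 1).foldl (fun new j =>
      PySem.List.pySetD new j
        (PySem.List.pyGetD new j 0 + wk * PySem.List.pyGetD c (j - kn) 0)) new) c

-- partial binomial convolution: only weights k ≤ K applied
def Pp (n K : ℕ) (f : ℕ → ℤ) (j : ℕ) : ℤ :=
  ∑ k ∈ Finset.range (min K (j / n) + 1), (wN n k : ℤ) * f (j - k * n)

theorem Pp_zero (n : ℕ) (f : ℕ → ℤ) (j : ℕ) : Pp n 0 f j = f j := by
  unfold Pp
  simp [wN_left_zero]

theorem Pp_full (n K : ℕ) (f : ℕ → ℤ) (j : ℕ) (h : j / n ≤ K) : Pp n K f j = P n n f j := by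
  unfold Pp P
  rw [min_eq_right h]

theorem innerB_aux (N : ℕ) (c new : List Int) (wk : Int) (kn : ℕ) (hnew : new.length = N)
    (m : ℕ) (hm1 : kn ≤ m) (hm2 : m ≤ N) :
    (innerFold c wk (kn : Int) (m : Int) new).length = N ∧
      (∀ j, j < m → kn ≤ j →
        (innerFold c wk (kn : Int) (m : Int) new).getD j 0
          = new.getD j 0 + wk * c.getD (j - kn) 0) ∧
      (∀ j, j < kn ∨ m ≤ j →
        (innerFold c wk (kn : Int) (m : Int) new).getD j 0 = new.getD j 0) := by
  induction m, hm1 using Nat.le_induction with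
  | base =>
    have hnil : innerFold c wk (kn : Int) (kn : Int) new = new := by
      unfold innerFold
      rw [PySem.List.pyRange_one_eq_nil (le_refl _)]
      rfl
    rw [hnil]
    exact ⟨hnew, fun j h1 h2 => by omega, fun j _ => rfl⟩
  | succ m hm ih =>
    have hmN : m < N := by omega
    obtain ⟨ihlen, ihlo, ihhi⟩ := ih (by omega)
    set dm := innerFold c wk (kn : Int) (m : Int) new with hdm
    have hp : innerFold c wk (kn : Int) ((m+1 : ℕ) : Int) new = stepB c wk (kn : Int) dm (m : Int) := by
      unfold innerFold
      have hsplit : PySem.List.pyRange (kn : Int) ((m+1 : ℕ) : Int) 1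
          = PySem.List.pyRange (kn : Int) (m : Int) 1 ++ [(m : Int)] := by
        push_cast
        exact PySem.List.pyRange_one_succ_right (by exact_mod_cast hm)
      rw [hsplit, List.foldl_append]
      rfl
    rw [hp]
    have hcast : (m : Int) - (kn : Int) = ((m - kn : ℕ) : Int) := by push_cast [hm]; ring
    have hval : PySem.List.pyGetD dm (m : Int) 0 + wk * PySem.List.pyGetD c ((m : Int) - (kn : Int)) 0
        = new.getD m 0 + wk * c.getD (m - kn) 0 := by
      rw [hcast, PySem.List.pyGetD_natCast, PySem.List.pyGetD_natCast,
        ihhi m (Or.inr (le_refl m))]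
    have hsB : stepB c wk (kn : Int) dm (m : Int)
        = PySem.List.pySetD dm (m : Int)
            (PySem.List.pyGetD dm (m : Int) 0 + wk * PySem.List.pyGetD c ((m:Int) - (kn:Int)) 0) := rfl
    rw [hsB]
    have hgs : ∀ j : ℕ, (PySem.List.pySetD dm (m : Int)
        (PySem.List.pyGetD dm (m : Int) 0 + wk * PySem.List.pyGetD c ((m:Int) - (kn:Int)) 0)).getD j 0
        = if j = m then new.getD m 0 + wk * c.getD (m - kn) 0 else dm.getD j 0 := by
      intro j
      have h2 := PySem.List.pyGetD_pySetD_natCast dm m j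
        (PySem.List.pyGetD dm (m : Int) 0 + wk * PySem.List.pyGetD c ((m:Int) - (kn:Int)) 0)
        0 (by omega)
      rw [← PySem.List.pyGetD_natCast, h2, hval, PySem.List.pyGetD_natCast]
    refine ⟨?_, ?_, ?_⟩
    · rw [PySem.List.pySetD_natCast, List.length_set, ihlen]
    · intro j hj hknj
      rw [hgs j]
      by_cases hjm : j = m
      · rw [if_pos hjm, hjm]
      · rw [if_neg hjm]
        exact ihlo j (by omega) hknj
    · intro j hj
      rw [hgs j, if_neg (by omega)]
      exact ihhi j (by omega)

theorem midB_aux (N n Kn : ℕ) (hn : 0 < n) (hN : 0 < N) (hKn : (N-1)/n = Kn)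
    (c w : List Int) (hc : c.length = N)
    (hw : ∀ k, k ≤ Kn → w.getD k 0 = (wN n k : ℤ)) :
    ∀ K, K ≤ Kn →
      (midFold (N : Int) (n : Int) w c K).length = N ∧
      ∀ j, j < N → (midFold (N : Int) (n : Int) w c K).getD j 0 = Pp n K (tl c) j := by
  intro K
  induction K with
  | zero =>
    intro _
    have hnil : midFold (N : Int) (n : Int) w c 0 = c := by
      unfold midFold
      have e : ((0+1 : ℕ) : Int) = 1 := by norm_num
      rw [e, PySem.List.pyRange_one_eq_nil (le_refl _)]
      rfl
    rw [hnil]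
    exact ⟨hc, fun j _ => (Pp_zero n (tl c) j).symm⟩
  | succ K ih =>
    intro hK
    obtain ⟨ihlen, ihval⟩ := ih (by omega)
    set dK := midFold (N : Int) (n : Int) w c K with hdK
    have hp : midFold (N : Int) (n : Int) w c (K+1)
        = innerFold c (PySem.List.pyGetD w ((K+1 : ℕ) : Int) 0)
            (((K+1 : ℕ) : Int) * (n : Int)) (N : Int) dK := by
      unfold midFold
      have hsplit : PySem.List.pyRange 1 ((K+1+1 : ℕ) : Int) 1
          = PySem.List.pyRange 1 ((K+1 : ℕ) : Int) 1 ++ [((K+1 : ℕ) : Int)] := by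
        push_cast
        exact PySem.List.pyRange_one_succ_right (by omega)
      rw [hsplit, List.foldl_append]
      rfl
    have hwk : PySem.List.pyGetD w ((K+1 : ℕ) : Int) 0 = (wN n (K+1) : ℤ) := by
      rw [PySem.List.pyGetD_natCast]
      exact hw (K+1) hK
    have hknc : ((K+1 : ℕ) : Int) * (n : Int) = (((K+1)*n : ℕ) : Int) := by push_cast; ring
    have hknN : (K+1)*n ≤ N := by
      have h1 : K+1 ≤ (N-1)/n := by omega
      have h2 : (K+1)*n ≤ N-1 := (Nat.le_div_iff_mul_le hn).mp h1
      omega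
    rw [hp, hwk, hknc]
    obtain ⟨ilen, ilo, ihi⟩ := innerB_aux N c dK ((wN n (K+1) : ℤ)) ((K+1)*n) ihlen N hknN (le_refl N)
    refine ⟨ilen, ?_⟩
    intro j hj
    by_cases hjk : (K+1)*n ≤ j
    · rw [ilo j hj hjk, ihval j hj]
      have hdiv : K+1 ≤ j / n := (Nat.le_div_iff_mul_le hn).mpr hjk
      unfold Pp
      rw [min_eq_left (Nat.le_of_succ_le hdiv), min_eq_left hdiv]
      conv_rhs => rw [Finset.sum_range_succ]
      rfl
    · rw [ihi j (Or.inl (by omega)), ihval j hj]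
      have hdiv : j / n ≤ K := by
        by_contra hcon
        exact hjk ((Nat.le_div_iff_mul_le hn).mp (by omega))
      unfold Pp
      rw [min_eq_right hdiv, min_eq_right (Nat.le_succ_of_le hdiv)]

theorem roundB_spec (N n : ℕ) (hn : 0 < n) (hN : 0 < N) (c : List Int) (hc : c.length = N) :
    (bodyB (N : Int) c (n : Int)).length = N ∧
      ∀ j, j < N → (bodyB (N : Int) c (n : Int)).getD j 0 = P n n (tl c) j := by
  obtain ⟨Kn, hKn⟩ : ∃ K : ℕ, (N-1)/n = K := ⟨_, rfl⟩
  have hkmax : PySem.Int.floordiv ((N : Int) - 1) (n : Int) = ((Kn : ℕ) : Int) := by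
    have e : (N : Int) - 1 = ((N - 1 : ℕ) : Int) := by omega
    rw [e, PySem.Int.floordiv_natCast, hKn]
  have hw : (PySem.List.pyRange 1 (PySem.Int.floordiv ((N : Int) - 1) (n : Int) + 1) 1).foldl
      (stepW (n : Int)) (List.replicate (PySem.Int.floordiv ((N : Int) - 1) (n : Int) + 1).toNat (1 : Int))
      = wPart (n : Int) Kn Kn := by
    unfold wPart
    rw [hkmax]
    have e1 : ((Kn : ℕ) : Int) + 1 = ((Kn + 1 : ℕ) : Int) := by push_cast; ring
    rw [e1]
    have e2 : (((Kn + 1 : ℕ) : ℕ) : Int).toNat = Kn + 1 := by omega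
    rw [e2]
  obtain ⟨wlen, wlo, _⟩ := wAux n Kn hn Kn (le_refl Kn)
  have hbody : bodyB (N : Int) c (n : Int) = midFold (N : Int) (n : Int) (wPart (n : Int) Kn Kn) c Kn := by
    simp only [bodyB]
    rw [hw]
    unfold midFold
    rw [hkmax]
    have e1 : ((Kn : ℕ) : Int) + 1 = ((Kn + 1 : ℕ) : Int) := by push_cast; ring
    rw [e1]
    rfl
  rw [hbody]
  obtain ⟨mlen, mval⟩ := midB_aux N n Kn hn hN hKn c (wPart (n : Int) Kn Kn) hc wlo Kn (le_refl Kn)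
  refine ⟨mlen, ?_⟩
  intro j hj
  rw [mval j hj]
  apply Pp_full
  have h1 : j / n ≤ (N-1)/n := Nat.div_le_div_right (by omega)
  omega

-- ===== the two rounds agree; outer loops agree =====
theorem roundAB_eq (N n : ℕ) (hn : 0 < n) (hnN : n ≤ N) (hN : 0 < N)
    (c : List Int) (hc : c.length = N) :
    bodyA (N : Int) c (n : Int) = bodyB (N : Int) c (n : Int) ∧
      (bodyA (N : Int) c (n : Int)).length = N := by
  obtain ⟨la, va⟩ := roundA_spec N n hn hnN c hc
  obtain ⟨lb, vb⟩ := roundB_spec N n hn hN c hc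
  refine ⟨?_, la⟩
  apply List.ext_getElem (by omega)
  intro i h1 h2
  rw [← List.getD_eq_getElem _ 0 h1, ← List.getD_eq_getElem _ 0 h2,
    va i (by omega), vb i (by omega)]

theorem outer_eq (N : ℕ) (hN : 0 < N) (L : List Int)
    (hL : ∀ x ∈ L, 1 ≤ x ∧ x < (N : Int)) :
    ∀ c : List Int, c.length = N →
      L.foldl (bodyA (N : Int)) c = L.foldl (bodyB (N : Int)) c := by
  induction L with
  | nil => intro c _; rfl
  | cons x t ih =>
    intro c hc
    obtain ⟨hx1, hx2⟩ := hL x (List.mem_cons_self)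
    have hxn : x = ((x.toNat : ℕ) : Int) := by omega
    have hn : 0 < x.toNat := by omega
    have hnN : x.toNat ≤ N := by omega
    obtain ⟨heq, hlen⟩ := roundAB_eq N x.toNat hn hnN hN c hc
    rw [List.foldl_cons, List.foldl_cons, ← hxn] at *
    rw [hxn, heq, ← hxn]
    exact ih (fun y hy => hL y (List.mem_cons_of_mem x hy)) _ (by rw [hxn] at hlen ⊢; rw [← heq] at *; exact hlen)

-- ===== VERDICT (by name: the statement is the Claim_ definition above) =====
theorem macmahon_coeffs_spec : Claim_equal_macmahon_coeffs := by
  unfold Claim_equal_macmahon_coeffs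
  intro nmax _ hpre
  unfold Spec_macmahon_coeffs
  have hp1 : (1 : Int) ≤ nmax := hpre
  set N : ℕ := nmax.toNat with hNdef
  have hNpos : 0 < N := by omega
  have hnm : nmax = (N : Int) := by omega
  have c0len : (PySem.List.pySetD (List.replicate nmax.toNat (0 : Int)) 0 1).length = N := by
    rw [PySem.List.pySetD_of_nonneg _ _ (by omega), List.length_set, List.length_replicate]
  have hA : macmahon_coeffs nmax
      = (PySem.List.pyRange 1 nmax 1).foldl (bodyA nmax)
          (PySem.List.pySetD (List.replicate nmax.toNat (0 : Int)) 0 1) := rfl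
  have hB : macmahon_coeffs_alt nmax
      = (PySem.List.pyRange 1 nmax 1).foldl (bodyB nmax)
          (PySem.List.pySetD (List.replicate nmax.toNat (0 : Int)) 0 1) := rfl
  rw [hA, hB, hnm]
  exact outer_eq N hNpos _ (fun x hx => PySem.List.mem_pyRange_one.mp hx) _ c0len
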